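-- pv_equiv track=rewrite | github.com/esaurez/LoadShedderInterface | src/color_analysis/hue_analysis/plot_hue_pdf.py | aggregate_frame_hues
-- ===== SOURCE A (Python) =====
-- def aggregate_frame_hues(hues, hue_width):
--     aggr = {}
--     for hue_idx in range(len(hues)):
--         bin_idx = int(hue_idx/hue_width)
--         if bin_idx not in aggr:
--             aggr[bin_idx] = 0
--         aggr[bin_idx] += hues[hue_idx]
--     return aggr
-- ===== SOURCE B (Python) =====
-- def aggregate_frame_hues(hues, hue_width):
--     # The bin index int(j / hue_width) is constant on contiguous runs of j
--     # (truncation of a monotone sequence is monotone), so scan one whole run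
--     # per outer step: the inner loop sums the run, then a single insert
--     # records the bin.  No per-element dict lookup/update is performed.
--     result = {}
--     n = len(hues)
--     i = 0
--     while i < n:
--         k = int(i / hue_width)
--         total = 0
--         j = i
--         while j < n and int(j / hue_width) == k:
--             total += hues[j]
--             j += 1
--         result[k] = total
--         i = j
--     return result
-- ===== Notes on version B (the rewrite author's own statement) =====
-- stated objective: alternative
-- what changed: Replaces A's per-element dict membership test and keyed accumulation with a two-level chunk scan: since bin indices are monotone in the element index, an inner loop sums each whole contiguous run locally and the outer loop performs exactly one dict insert per bin.
import Mathlib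
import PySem

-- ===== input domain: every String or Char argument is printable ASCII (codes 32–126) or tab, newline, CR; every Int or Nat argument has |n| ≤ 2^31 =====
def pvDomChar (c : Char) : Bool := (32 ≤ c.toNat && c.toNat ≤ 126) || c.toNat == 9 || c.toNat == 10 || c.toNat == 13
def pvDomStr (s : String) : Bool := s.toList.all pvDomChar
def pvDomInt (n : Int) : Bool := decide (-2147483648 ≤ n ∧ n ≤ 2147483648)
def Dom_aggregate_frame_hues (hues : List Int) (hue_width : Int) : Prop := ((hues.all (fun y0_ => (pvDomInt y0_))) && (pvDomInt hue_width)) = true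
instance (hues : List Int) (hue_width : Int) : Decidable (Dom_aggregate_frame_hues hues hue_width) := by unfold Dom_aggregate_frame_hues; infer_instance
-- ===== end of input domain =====

-- B replaces A's per-element dict accumulation with a two-level chunk scan (bin indices
-- are monotone, so an inner loop sums each contiguous run and one insert records each bin):
-- an alternative decomposition of the same task, proved to return the same dict.

-- ===== PORT A =====
-- int(hue_idx/hue_width) is PySem.Int.truncdiv (exact while |numerator|,|divisor| < 2^53;
-- the numerator is a list position and |hue_width| ≤ 2^31 by Dom)
def aggregate_frame_hues (hues : List Int) (hue_width : Int) : List (Int × Int) :=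
  ((PySem.List.pyRange 0 (hues.length : Int) 1).foldl
    (fun aggr hue_idx =>
      let bin_idx := PySem.Int.truncdiv hue_idx hue_width
      let aggr' := if aggr.contains bin_idx then aggr else aggr.insert bin_idx 0
      aggr'.insert bin_idx (aggr'.getD bin_idx 0 + PySem.List.pyGetD hues hue_idx 0))
    PySem.Dict.empty).items

-- ===== PORT B =====
-- B's inner while loop: starting from accumulator acc, consume elements while their
-- index j has int(j/w) == k, summing them; return the total and the unconsumed rest.
-- (B reads hues[j] for consecutive indices j, so the index loop is ported over
-- enumerate(hues), which pairs each index with exactly the element hues[j] reads.)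
def pvInner (w k : Int) : Int → List (Int × Int) → Int × List (Int × Int)
  | acc, [] => (acc, [])
  | acc, (j, h) :: rest =>
      if PySem.Int.truncdiv j w = k then pvInner w k (acc + h) rest
      else (acc, (j, h) :: rest)

-- termination helper for pvOuter (cited in its decreasing_by)
lemma pvInner_length (w k : Int) : ∀ (acc : Int) (l : List (Int × Int)),
    (pvInner w k acc l).2.length ≤ l.length := by
  intro acc l
  induction l generalizing acc with
  | nil => simp [pvInner]
  | cons p rest ih =>
    obtain ⟨j, h⟩ := p
    by_cases hc : PySem.Int.truncdiv j w = k
    · simp only [pvInner, if_pos hc]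
      exact le_trans (ih _) (Nat.le_succ _)
    · simp [pvInner, hc]

-- B's outer while loop: one iteration per bin; the inner loop (whose first test holds
-- at j = i by the definition of k) sums the run, then result[k] = total is one insert.
def pvOuter (w : Int) (d : PySem.Dict Int Int) : List (Int × Int) → PySem.Dict Int Int
  | [] => d
  | (i, h) :: rest =>
      pvOuter w
        (d.insert (PySem.Int.truncdiv i w)
          (pvInner w (PySem.Int.truncdiv i w) 0 ((i, h) :: rest)).1)
        (pvInner w (PySem.Int.truncdiv i w) 0 ((i, h) :: rest)).2
termination_by l => l.length
decreasing_by
  have hstep : pvInner w (PySem.Int.truncdiv i w) 0 ((i, h) :: rest)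
      = pvInner w (PySem.Int.truncdiv i w) (0 + h) rest := by
    simp [pvInner]
  have : (pvInner w (PySem.Int.truncdiv i w) 0 ((i, h) :: rest)).2.length ≤ rest.length := by
    rw [hstep]; exact pvInner_length _ _ _ _
  simp only [List.length_cons]
  omega

def aggregate_frame_hues_alt (hues : List Int) (hue_width : Int) : List (Int × Int) :=
  (pvOuter hue_width PySem.Dict.empty (PySem.List.enumerate hues 0)).items

-- ===== PRECONDITION & SPEC =====
-- Pre_ excludes only inputs where both Pythons raise ZeroDivisionError:
-- hue_width = 0 with a nonempty list (the division runs only when the loop body runs).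
def Pre_aggregate_frame_hues (hues : List Int) (hue_width : Int) : Prop :=
  hues = [] ∨ hue_width ≠ 0
instance (hues : List Int) (hue_width : Int) : Decidable (Pre_aggregate_frame_hues hues hue_width) := by unfold Pre_aggregate_frame_hues; infer_instance

def pvWitness_aggregate_frame_hues : List Int × Int := ([3, 5, 7, -2], 2)

def Spec_aggregate_frame_hues (hues : List Int) (hue_width : Int) (out : List (Int × Int)) : Prop := out = aggregate_frame_hues_alt hues hue_width
instance (hues : List Int) (hue_width : Int) (out : List (Int × Int)) : Decidable (Spec_aggregate_frame_hues hues hue_width out) := by unfold Spec_aggregate_frame_hues; infer_instance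

-- ===== CLAIM (what is proved, stated in full; the proofs are below) =====
def Claim_equal_aggregate_frame_hues : Prop := ∀ (hues : List Int) (hue_width : Int), Dom_aggregate_frame_hues hues hue_width → Pre_aggregate_frame_hues hues hue_width → Spec_aggregate_frame_hues hues hue_width (aggregate_frame_hues hues hue_width)

-- ===== LEMMAS AND PROOFS =====

-- named form of A's loop body, used only by the proofs
def pvStepA (w : Int) (aggr : PySem.Dict Int Int) (p : Int × Int) : PySem.Dict Int Int :=
  let bin_idx := PySem.Int.truncdiv p.1 w
  let aggr' := if aggr.contains bin_idx then aggr else aggr.insert bin_idx 0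
  aggr'.insert bin_idx (aggr'.getD bin_idx 0 + p.2)

-- A's loop over range(len(hues)) reading hues[i] is the loop over enumerate(hues).
lemma pv_bridgeA (hues : List Int) (w : Int) :
    ∀ (fuel s : Nat), hues.length ≤ s + fuel → ∀ (acc : PySem.Dict Int Int),
    (PySem.List.pyRange (s : Int) (hues.length : Int) 1).foldl
      (fun aggr hue_idx =>
        let bin_idx := PySem.Int.truncdiv hue_idx w
        let aggr' := if aggr.contains bin_idx then aggr else aggr.insert bin_idx 0
        aggr'.insert bin_idx (aggr'.getD bin_idx 0 + PySem.List.pyGetD hues hue_idx 0)) acc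
    = (PySem.List.enumerate (hues.drop s) (s : Int)).foldl (pvStepA w) acc := by
  intro fuel
  induction fuel with
  | zero =>
    intro s hle acc
    have h1 : PySem.List.pyRange (s : Int) (hues.length : Int) 1 = [] :=
      PySem.List.pyRange_one_eq_nil (by exact_mod_cast hle)
    have h2 : hues.drop s = [] := List.drop_of_length_le (by omega)
    simp [h1, h2]
  | succ fuel ih =>
    intro s hle acc
    by_cases hs : hues.length ≤ s
    · have h1 : PySem.List.pyRange (s : Int) (hues.length : Int) 1 = [] :=
        PySem.List.pyRange_one_eq_nil (by exact_mod_cast hs)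
      have h2 : hues.drop s = [] := List.drop_of_length_le (by omega)
      simp [h1, h2]
    · have hs2 : s < hues.length := Nat.lt_of_not_le hs
      have hcons := PySem.List.pyRange_one_cons (a := (s : Int)) (b := (hues.length : Int))
        (by exact_mod_cast hs2)
      have hdrop : hues.drop s = hues[s] :: hues.drop (s + 1) := List.drop_eq_getElem_cons hs2
      have hget : PySem.List.pyGetD hues (s : Int) 0 = hues[s] := by
        simp [List.getD_eq_getElem?_getD, List.getElem?_eq_getElem hs2]
      have hc : (s : Int) + 1 = ((s + 1 : Nat) : Int) := by push_cast; ring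
      rw [hcons, hdrop, PySem.List.enumerate_cons]
      simp only [List.foldl_cons]
      rw [hc, ih (s + 1) (by omega)]
      congr 1
      simp [pvStepA, hget]

-- int(i/w) on 0 ≤ m ≤ s ≤ j is monotone (w > 0) or antitone (w < 0): equal endpoints squeeze.
lemma pv_interval (w m s j : Int) (hw : w ≠ 0) (hm : 0 ≤ m) (hms : m ≤ s) (hsj : s ≤ j)
    (h : PySem.Int.truncdiv j w = PySem.Int.truncdiv m w) :
    PySem.Int.truncdiv s w = PySem.Int.truncdiv m w := by
  have e : ∀ a : Int, 0 ≤ a → PySem.Int.truncdiv a w = a / w := by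
    intro a ha
    show a.tdiv w = a / w
    rw [Int.tdiv_eq_ediv]
    simp [ha]
  rw [e m hm, e s (by omega)]
  rw [e m hm, e j (by omega)] at h
  rcases lt_or_gt_of_ne hw with hneg | hpos
  · have hw' : (0 : Int) < -w := by omega
    have eneg : ∀ a : Int, a / w = -(a / (-w)) := by
      intro a
      conv_lhs => rw [show w = -(-w) from (neg_neg w).symm]
      exact Int.ediv_neg a (-w)
    rw [eneg m, eneg s]
    rw [eneg m, eneg j] at h
    have h1 := Int.ediv_le_ediv hw' hms
    have h2 := Int.ediv_le_ediv hw' hsj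
    omega
  · have h1 := Int.ediv_le_ediv hpos hms
    have h2 := Int.ediv_le_ediv hpos hsj
    omega

-- B's inner loop, run from a dict in which k is fresh with current total acc, advances
-- A's fold in lockstep: A keeps updating the entry at k in place.
lemma pv_inner_spec (w k : Int) :
    ∀ (xs : List Int) (s acc : Int) (d : PySem.Dict Int Int),
    d.contains k = false →
    ∃ (m : Nat) (t : Int),
      m ≤ xs.length ∧
      pvInner w k acc (PySem.List.enumerate xs s) = (t, PySem.List.enumerate (xs.drop m) (s + m)) ∧
      (∀ p ∈ (PySem.List.enumerate (xs.drop m) (s + m)).head?, PySem.Int.truncdiv p.1 w ≠ k) ∧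
      (PySem.List.enumerate xs s).foldl (pvStepA w) (d.insert k acc)
        = (PySem.List.enumerate (xs.drop m) (s + m)).foldl (pvStepA w) (d.insert k t) := by
  intro xs
  induction xs with
  | nil =>
    intro s acc d hcont
    exact ⟨0, acc, le_refl 0, by simp [PySem.List.enumerate, pvInner], by simp, by simp⟩
  | cons x xs ih =>
    intro s acc d hcont
    rw [PySem.List.enumerate_cons]
    by_cases hx : PySem.Int.truncdiv s w = k
    · obtain ⟨m, t, h0, h1, h2, h3⟩ := ih (s + 1) (acc + x) d hcont
      refine ⟨m + 1, t, by simp only [List.length_cons]; omega, ?_, ?_, ?_⟩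
      · simp only [pvInner, if_pos hx, h1, List.drop_succ_cons]
        congr 2
        push_cast
        ring
      · intro p hp
        apply h2
        rw [show (s : Int) + (↑(m + 1) : Int) = s + 1 + m by push_cast; ring] at hp
        simpa using hp
      · have hstep : pvStepA w (d.insert k acc) (s, x) = d.insert k (acc + x) := by
          simp [pvStepA, hx, PySem.Dict.contains_insert_self, PySem.Dict.getD_insert_self,
            PySem.Dict.insert_insert_self]
        rw [List.foldl_cons, hstep, h3, List.drop_succ_cons,
          show (s : Int) + (↑(m + 1) : Int) = s + 1 + m by push_cast; ring]
    · refine ⟨0, acc, Nat.zero_le _, ?_, ?_, by simp⟩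
      · simp [pvInner, hx, PySem.List.enumerate_cons]
      · intro p hp
        simp at hp
        subst hp
        exact hx

-- Main invariant: B's outer loop equals A's fold, given that no future index in the
-- list maps to a key already present in the dict.
lemma pv_main (w : Int) (hw : w ≠ 0) :
    ∀ (n : Nat) (xs : List Int), xs.length ≤ n → ∀ (s : Int) (d : PySem.Dict Int Int),
    0 ≤ s →
    (∀ k' ∈ d.keys, ∀ j : Int, s ≤ j → j < s + xs.length → PySem.Int.truncdiv j w ≠ k') →
    pvOuter w d (PySem.List.enumerate xs s)
      = (PySem.List.enumerate xs s).foldl (pvStepA w) d := by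
  intro n
  induction n with
  | zero =>
    intro xs hn s d _ _
    have : xs = [] := List.eq_nil_of_length_eq_zero (by omega)
    subst this
    simp [PySem.List.enumerate, pvOuter]
  | succ n ih =>
    intro xs hn s d hs hinv
    cases xs with
    | nil => simp [PySem.List.enumerate, pvOuter]
    | cons x xs' =>
      rw [PySem.List.enumerate_cons]
      have hcont : d.contains (PySem.Int.truncdiv s w) = false := by
        rw [PySem.Dict.contains_eq_decide_mem_keys]
        simp only [decide_eq_false_iff_not]
        intro hmem
        exact hinv _ hmem s le_rfl (by simp) rfl
      have hin : pvInner w (PySem.Int.truncdiv s w) 0 ((s, x) :: PySem.List.enumerate xs' (s + 1))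
          = pvInner w (PySem.Int.truncdiv s w) (0 + x) (PySem.List.enumerate xs' (s + 1)) := by
        simp [pvInner]
      obtain ⟨m, t, h0, h1, h2, h3⟩ := pv_inner_spec w (PySem.Int.truncdiv s w) xs' (s + 1) (0 + x) d hcont
      have hd : (xs'.drop m).length = xs'.length - m := List.length_drop
      have houter : pvOuter w d ((s, x) :: PySem.List.enumerate xs' (s + 1))
          = pvOuter w (d.insert (PySem.Int.truncdiv s w) t)
              (PySem.List.enumerate (xs'.drop m) (s + 1 + m)) := by
        rw [pvOuter, hin, h1]
      rw [houter]
      have hstepA : pvStepA w d (s, x) = d.insert (PySem.Int.truncdiv s w) (0 + x) := by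
        simp only [pvStepA, hcont]
        simp [PySem.Dict.getD_insert_self, PySem.Dict.insert_insert_self]
      have hinv' : ∀ k' ∈ (d.insert (PySem.Int.truncdiv s w) t).keys,
          ∀ j : Int, s + 1 + m ≤ j → j < s + 1 + m + (xs'.drop m).length →
          PySem.Int.truncdiv j w ≠ k' := by
        intro k' hk' j hj1 hj2
        rw [hd] at hj2
        rcases (PySem.Dict.mem_keys_insert _ _ _ _).mp hk' with hk | hk
        · subst hk
          intro he
          -- j ≥ head index of the rest; the head's key differs from k, squeeze via index s
          cases hrest : PySem.List.enumerate (xs'.drop m) (s + 1 + m) with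
          | nil =>
            have : (xs'.drop m).length = 0 := by
              have := congrArg List.length hrest
              simpa [PySem.List.length_enumerate] using this
            exfalso
            rw [hd] at this
            omega
          | cons p ps =>
            have hhead := h2 p (by simp [hrest])
            have hp1 : p.1 = s + 1 + m := by
              have : (PySem.List.enumerate (xs'.drop m) (s + 1 + m))[0]? = some p := by
                simp [hrest]
              cases xs'm : xs'.drop m with
              | nil => rw [xs'm] at hrest; simp [PySem.List.enumerate] at hrest
              | cons y ys =>
                rw [xs'm, PySem.List.enumerate_cons] at hrest
                have := hrest
                injection this with h _
                rw [← h]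
            have hsq := pv_interval w s (s + 1 + m) j hw hs (by omega) hj1 he
            rw [← hp1] at hsq
            exact hhead hsq
        · exact hinv k' hk j (by omega) (by simp only [List.length_cons]; omega)
      rw [ih (xs'.drop m) (by rw [hd]; simp only [List.length_cons] at hn; omega)
        (s + 1 + m) _ (by omega) hinv']
      rw [List.foldl_cons, hstepA, h3]

-- ===== VERDICT (by name: the statement is the Claim_ definition above) =====
theorem aggregate_frame_hues_spec : Claim_equal_aggregate_frame_hues := by
  intro hues w _hdom hpre
  unfold Spec_aggregate_frame_hues
  rcases hpre with hnil | hw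
  · subst hnil
    simp [aggregate_frame_hues, aggregate_frame_hues_alt, PySem.List.enumerate, pvOuter]
  · show aggregate_frame_hues hues w = aggregate_frame_hues_alt hues w
    unfold aggregate_frame_hues aggregate_frame_hues_alt
    have hb := pv_bridgeA hues w hues.length 0 (by omega) PySem.Dict.empty
    simp only [Nat.cast_zero, List.drop_zero] at hb
    rw [hb]
    rw [pv_main w hw hues.length hues le_rfl 0 PySem.Dict.empty le_rfl (by simp [PySem.Dict.keys_empty])]
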